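-- pv_equiv track=rewrite | github.com/ZosiaZamoyska/algorithms | solutions/introduction/Leader Search/tape.py | count_valid_cuts
-- ===== SOURCE A (Python) =====
-- def find_leader(arr):
--     candidate, count = None, 0
--
--     for num in arr:
--         if count == 0:
--             candidate = num
--             count = 1
--         else:
--             count += 1 if num == candidate else -1
--
--     leader_count = arr.count(candidate)
--     if leader_count > len(arr) // 2:
--         return candidate, leader_count
--     return None, 0
--
-- def count_valid_cuts(arr):
--     n = len(arr)
--     leader, leader_count = find_leader(arr)
--
--     if leader is None:
--         return 0
--
--     left_count, valid_cuts = 0, 0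
--     for i in range(n - 1):
--         if arr[i] == leader:
--             left_count += 1
--         left_size = i + 1
--         right_size = n - left_size
--         if left_count > left_size // 2 and (leader_count - left_count) > right_size // 2:
--             valid_cuts += 1
--
--     return valid_cuts
-- ===== SOURCE B (Python) =====
-- def count_valid_cuts(arr):
--     n = len(arr)
--     # frequency table instead of Boyer-Moore voting
--     freq = {}
--     for x in arr:
--         freq[x] = freq.get(x, 0) + 1
--     leader, leader_count = max(freq.items(), key=lambda kv: kv[1], default=(0, 0))
--     if leader_count <= n // 2:
--         return 0
--     # prefix counts of the leader, then a pure read-only scan over cut points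
--     prefix = []
--     c = 0
--     for x in arr:
--         c += 1 if x == leader else 0
--         prefix.append(c)
--     total = 0
--     for i in range(n - 1):
--         if prefix[i] > (i + 1) // 2 and leader_count - prefix[i] > (n - i - 1) // 2:
--             total += 1
--     return total
-- ===== Notes on version B (the rewrite author's own statement) =====
-- stated objective: alternative
-- what changed: Boyer-Moore candidate voting is replaced by a frequency table whose max-by-count entry is taken as the leader, and the incremental left-count cut scan is replaced by a precomputed prefix-count array read in a pure counting pass.
import Mathlib
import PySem

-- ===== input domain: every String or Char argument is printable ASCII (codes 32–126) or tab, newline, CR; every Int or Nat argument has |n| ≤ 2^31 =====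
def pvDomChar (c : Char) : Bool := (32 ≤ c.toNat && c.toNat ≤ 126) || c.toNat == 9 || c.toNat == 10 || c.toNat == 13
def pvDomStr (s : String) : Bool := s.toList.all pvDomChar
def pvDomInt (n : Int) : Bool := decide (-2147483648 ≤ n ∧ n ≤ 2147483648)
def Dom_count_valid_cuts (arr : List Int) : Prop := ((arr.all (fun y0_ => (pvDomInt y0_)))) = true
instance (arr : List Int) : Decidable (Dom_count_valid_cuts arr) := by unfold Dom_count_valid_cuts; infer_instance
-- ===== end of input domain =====

-- B replaces Boyer–Moore voting by a frequency table with a max-by-count pick, and the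
-- incremental cut scan by a precomputed prefix-count array read in a pure summation pass
-- (objective: alternative; same return value on every input).

-- ===== PORT A =====
def findLeaderLoop : List Int → Option Int → Int → Option Int × Int
  | [], candidate, count => (candidate, count)
  | num :: rest, candidate, count =>
    if count = 0 then findLeaderLoop rest (some num) 1
    else findLeaderLoop rest candidate (count + if some num = candidate then 1 else -1)

def find_leader (arr : List Int) : Option Int × Int :=
  let r := findLeaderLoop arr none 0
  -- arr.count(candidate): candidate may be None, which equals no int, so that count is 0
  let leader_count : Int := match r.1 with
    | none => 0
    | some c => (arr.count c : Int)
  if leader_count > PySem.Int.floordiv (arr.length : Int) 2 then (r.1, leader_count)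
  else (none, 0)

def cutStepA (arr : List Int) (n leader leader_count : Int) (st : Int × Int) (i : Int) : Int × Int :=
  -- arr[i] with i drawn from range(n-1): always in range, so the pyGetD default is never used
  let left_count := st.1 + (if PySem.List.pyGetD arr i 0 = leader then 1 else 0)
  let left_size := i + 1
  let right_size := n - left_size
  (left_count,
   st.2 + (if left_count > PySem.Int.floordiv left_size 2 ∧
              leader_count - left_count > PySem.Int.floordiv right_size 2 then 1 else 0))

def count_valid_cuts (arr : List Int) : Int :=
  let n : Int := (arr.length : Int)
  let fl := find_leader arr
  match fl.1 with
  | none => 0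
  | some leader =>
    ((PySem.List.pyRange 0 (n - 1) 1).foldl (cutStepA arr n leader fl.2) (0, 0)).2

-- ===== PORT B =====
def prefixStep (leader : Int) (st : Int × List Int) (x : Int) : Int × List Int :=
  let c := st.1 + (if x = leader then 1 else 0)
  (c, st.2 ++ [c])

def cutStepB (pre : List Int) (n leader_count : Int) (acc : Int) (i : Int) : Int :=
  -- prefix[i] with i drawn from range(n-1): always in range, so the pyGetD default is never used
  acc + (if PySem.List.pyGetD pre i 0 > PySem.Int.floordiv (i + 1) 2 ∧
            leader_count - PySem.List.pyGetD pre i 0 > PySem.Int.floordiv (n - i - 1) 2 then 1 else 0)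

def count_valid_cuts_alt (arr : List Int) : Int :=
  let n : Int := (arr.length : Int)
  let freq := arr.foldl (fun d x => d.insert x (d.getD x 0 + 1)) (PySem.Dict.empty : PySem.Dict Int Int)
  let best := PySem.List.maxD freq.items (fun kv => kv.2) (0, 0)
  if best.2 ≤ PySem.Int.floordiv n 2 then 0
  else
    let pre := (arr.foldl (prefixStep best.1) (0, [])).2
    (PySem.List.pyRange 0 (n - 1) 1).foldl (cutStepB pre n best.2) 0

-- ===== PRECONDITION & SPEC =====
def Spec_count_valid_cuts (arr : List Int) (out : Int) : Prop := out = count_valid_cuts_alt arr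
instance (arr : List Int) (out : Int) : Decidable (Spec_count_valid_cuts arr out) := by unfold Spec_count_valid_cuts; infer_instance

-- ===== CLAIM (what is proved, stated in full; the proofs are below) =====
def Claim_equal_count_valid_cuts : Prop := ∀ (arr : List Int), Dom_count_valid_cuts arr → Spec_count_valid_cuts arr (count_valid_cuts arr)

-- ===== LEMMAS AND PROOFS =====

-- the summation both cut loops compute: cutInd is the cut test at index k, phrased
-- through the leader count of the prefix arr.take (k+1)
def cutInd (arr : List Int) (leader L : Int) (k : Nat) : Int :=
  if (((arr.take (k+1)).count leader : Int) > PySem.Int.floordiv ((k : Int) + 1) 2 ∧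
      L - ((arr.take (k+1)).count leader : Int) >
        PySem.Int.floordiv ((arr.length : Int) - ((k : Int) + 1)) 2) then 1 else 0

def cutSum (arr : List Int) (leader L : Int) (m : Nat) : Int :=
  ((List.range m).map (cutInd arr leader L)).sum

-- Boyer–Moore invariant: any value other than the final candidate occupies at most
-- half of the list (the candidate's surplus is bounded by the final counter).
lemma bm_inv (l : List Int) : ∀ (cand : Option Int) (cnt : Int), 0 ≤ cnt →
    0 ≤ (findLeaderLoop l cand cnt).2 ∧
    ∀ x : Int, 2 * (l.count x : Int) + (if some x = cand then cnt else -cnt)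
      ≤ (l.length : Int) + (if some x = (findLeaderLoop l cand cnt).1
                            then (findLeaderLoop l cand cnt).2
                            else -(findLeaderLoop l cand cnt).2) := by
  induction l with
  | nil =>
    intro cand cnt h
    refine ⟨h, fun x => ?_⟩
    simp [findLeaderLoop]
  | cons num rest ih =>
    intro cand cnt h
    have step : ∀ (C : Option Int) (K : Int), 0 ≤ K →
        findLeaderLoop (num :: rest) cand cnt = findLeaderLoop rest C K →
        (∀ x : Int, (if some x = cand then cnt else -cnt) + (if num = x then 2 else 0)
            ≤ 1 + (if some x = C then K else -K)) →
        0 ≤ (findLeaderLoop (num :: rest) cand cnt).2 ∧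
        ∀ x : Int, 2 * ((num :: rest).count x : Int) + (if some x = cand then cnt else -cnt)
          ≤ ((num :: rest).length : Int) + (if some x = (findLeaderLoop (num :: rest) cand cnt).1
              then (findLeaderLoop (num :: rest) cand cnt).2
              else -(findLeaderLoop (num :: rest) cand cnt).2) := by
      intro C K hK hstep hcmp
      obtain ⟨h1, h2⟩ := ih C K hK
      refine ⟨hstep ▸ h1, fun x => ?_⟩
      have hx := h2 x
      have hc := hcmp x
      rw [hstep, List.count_cons]
      rcases eq_or_ne num x with hxn | hxn
      · have hc' : (if some x = cand then cnt else -cnt) + 2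
            ≤ 1 + (if some x = C then K else -K) := by simpa [hxn] using hc
        simp only [hxn, beq_self_eq_true, if_true, List.length_cons]
        push_cast
        omega
      · have hc' : (if some x = cand then cnt else -cnt)
            ≤ 1 + (if some x = C then K else -K) := by simpa [hxn] using hc
        have : (num == x) = false := by simpa using hxn
        simp only [this, List.length_cons]
        push_cast
        omega
    by_cases hc0 : cnt = 0
    · subst hc0
      refine step (some num) 1 (by omega) (by simp [findLeaderLoop]) ?_
      intro x
      by_cases hxn : num = x
      · subst hxn; simp
      · have : ¬ (some x = some num) := by simpa using fun e => hxn e.symm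
        simp [this, hxn]
    · by_cases hm : some num = cand
      · refine step cand (cnt + 1) (by omega) (by simp [findLeaderLoop, hc0, hm]) ?_
        intro x
        by_cases hxc : some x = cand
        · have hxn : num = x := by
            have : some num = some x := hm.trans hxc.symm
            simpa using this
          simp [hxc, hxn]
          omega
        · have hxn : ¬ (num = x) := fun e => hxc (e ▸ hm)
          simp [hxc, hxn]
      · refine step cand (cnt + -1) (by omega) (by simp [findLeaderLoop, hc0, hm]) ?_
        intro x
        by_cases hxc : some x = cand
        · have hxn : ¬ (num = x) := fun e => hm (e ▸ hxc)
          simp [hxc, hxn]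
        · by_cases hxn : num = x
          · simp [hxc, hxn]; omega
          · simp [hxc, hxn]; omega

lemma two_count_le (l : List Int) (a b : Int) (h : a ≠ b) :
    l.count a + l.count b ≤ l.length := by
  induction l with
  | nil => simp
  | cons y t ih =>
    simp only [List.count_cons, List.length_cons, beq_iff_eq]
    rcases eq_or_ne y a with hy | hy
    · rw [if_pos hy, if_neg (fun e => h (hy.symm.trans e))]
      omega
    · rw [if_neg hy]
      rcases eq_or_ne y b with hb | hb
      · rw [if_pos hb]; omega
      · rw [if_neg hb]; omega

lemma count_take_succ (l : List Int) (a : Int) (k : Nat) (hk : k < l.length) :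
    (l.take (k+1)).count a = (l.take k).count a + (if l[k] = a then 1 else 0) := by
  rw [List.take_add_one, List.count_append]
  congr 1
  simp [List.getElem?_eq_getElem hk, List.count_singleton]

lemma cutSum_succ (arr : List Int) (leader L : Int) (m : Nat) :
    cutSum arr leader L (m+1) = cutSum arr leader L m + cutInd arr leader L m := by
  simp [cutSum, List.range_succ]

lemma prefix_spec (leader : Int) : ∀ (l : List Int) (c : Int) (acc : List Int),
    (l.foldl (prefixStep leader) (c, acc)).2
      = acc ++ (List.range l.length).map (fun k => c + ((l.take (k+1)).count leader : Int)) := by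
  intro l
  induction l with
  | nil => intro c acc; simp
  | cons x rest ih =>
    intro c acc
    simp only [List.foldl_cons, prefixStep]
    rw [ih]
    simp only [List.length_cons, List.range_succ_eq_map, List.map_cons, List.map_map]
    rw [List.append_assoc]
    congr 1
    simp only [List.singleton_append]
    have hcount : ∀ (t : List Int), ((x :: t).count leader : Int)
        = (if x = leader then 1 else 0) + (t.count leader : Int) := by
      intro t
      simp only [List.count_cons, beq_iff_eq]
      rcases eq_or_ne x leader with h | h
      · rw [if_pos h, if_pos h]; push_cast; ring
      · rw [if_neg h, if_neg h]; push_cast; ring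
    congr 1
    · rw [List.take_succ_cons, List.take_zero, hcount]
      simp
    · apply List.map_congr_left
      intro k _
      simp only [Function.comp]
      rw [List.take_succ_cons, hcount]
      ring

lemma aloop_spec (arr : List Int) (leader L : Int) :
    ∀ m : Nat, m ≤ arr.length →
    (PySem.List.pyRange 0 (m : Int) 1).foldl (cutStepA arr (arr.length : Int) leader L) (0, 0)
      = (((arr.take m).count leader : Int), cutSum arr leader L m) := by
  intro m
  induction m with
  | zero => intro _; simp [PySem.List.pyRange_one_eq_nil, cutSum]
  | succ m ih =>
    intro hm
    have hmlt : m < arr.length := by omega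
    have hcast : ((m + 1 : Nat) : Int) = (m : Int) + 1 := by push_cast; ring
    rw [hcast, PySem.List.pyRange_one_succ_right (by positivity), List.foldl_append,
        ih (by omega)]
    simp only [List.foldl_cons, List.foldl_nil]
    have hget : PySem.List.pyGetD arr (m : Int) 0 = arr[m] := by
      rw [PySem.List.pyGetD_natCast]
      exact List.getD_eq_getElem arr 0 hmlt
    have hlc : ((arr.take m).count leader : Int) + (if arr[m] = leader then 1 else 0)
        = ((arr.take (m+1)).count leader : Int) := by
      rw [count_take_succ arr leader m hmlt]
      rcases eq_or_ne arr[m] leader with h | h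
      · rw [if_pos h, if_pos h]; push_cast; ring
      · rw [if_neg h, if_neg h]; push_cast; ring
    simp only [cutStepA, hget, hlc, cutSum_succ, cutInd]

lemma bloop_spec (arr : List Int) (leader L : Int) :
    ∀ m : Nat, m ≤ arr.length →
    (PySem.List.pyRange 0 (m : Int) 1).foldl
        (cutStepB ((arr.foldl (prefixStep leader) (0, [])).2) (arr.length : Int) L) 0
      = cutSum arr leader L m := by
  have hpre : (arr.foldl (prefixStep leader) (0, [])).2
      = (List.range arr.length).map (fun k => ((arr.take (k+1)).count leader : Int)) := by
    rw [prefix_spec]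
    simp
  intro m
  induction m with
  | zero => intro _; simp [PySem.List.pyRange_one_eq_nil, cutSum]
  | succ m ih =>
    intro hm
    have hmlt : m < arr.length := by omega
    have hcast : ((m + 1 : Nat) : Int) = (m : Int) + 1 := by push_cast; ring
    rw [hcast, PySem.List.pyRange_one_succ_right (by positivity), List.foldl_append,
        ih (by omega)]
    simp only [List.foldl_cons, List.foldl_nil]
    have hget : PySem.List.pyGetD ((arr.foldl (prefixStep leader) (0, [])).2) (m : Int) 0
        = ((arr.take (m+1)).count leader : Int) := by
      rw [hpre, PySem.List.pyGetD_natCast]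
      rw [List.getD_eq_getElem _ 0 (by simpa using hmlt)]
      simp
    have harith : (arr.length : Int) - (m : Int) - 1 = (arr.length : Int) - ((m : Int) + 1) := by
      ring
    simp only [cutStepB, hget, harith, cutSum_succ, cutInd]

lemma freq_items (arr : List Int) :
    (arr.foldl (fun d x => d.insert x (d.getD x 0 + 1)) (PySem.Dict.empty : PySem.Dict Int Int)).items
      = (PySem.Set.ofList arr).map (fun k => (k, (arr.count k : Int))) := by
  rw [PySem.Dict.foldl_insert_getD_add_one_eq_counter, PySem.Dict.items_counter]

-- ===== VERDICT (by name: the statement is the Claim_ definition above) =====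
theorem count_valid_cuts_spec : Claim_equal_count_valid_cuts := by
  intro arr _
  show count_valid_cuts arr = count_valid_cuts_alt arr
  obtain ⟨h1, h2⟩ := bm_inv arr none 0 (le_refl 0)
  by_cases hmaj : ∃ x : Int, (arr.length : Int) < 2 * (arr.count x : Int)
  · obtain ⟨m, hm⟩ := hmaj
    have hmem : m ∈ arr := by
      by_contra hnm
      rw [List.count_eq_zero.mpr hnm] at hm
      push_cast at hm
      omega
    have hlen1 : 1 ≤ arr.length := List.length_pos_of_mem hmem
    -- A side: the Boyer–Moore candidate is the majority value m
    have hx : 2 * (arr.count m : Int) ≤ (arr.length : Int) +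
        (if some m = (findLeaderLoop arr none 0).1 then (findLeaderLoop arr none 0).2
         else -(findLeaderLoop arr none 0).2) := by simpa using h2 m
    have hcand : (findLeaderLoop arr none 0).1 = some m := by
      by_contra hne
      rw [if_neg (fun e => hne e.symm)] at hx
      omega
    have hgt : PySem.Int.floordiv (arr.length : Int) 2 < (arr.count m : Int) := by
      rw [PySem.Int.floordiv_eq_ediv_of_pos (by norm_num)]
      omega
    have hfl : find_leader arr = (some m, (arr.count m : Int)) := by
      simp only [find_leader, hcand]
      rw [if_pos hgt]
    have hA : count_valid_cuts arr
        = ((PySem.List.pyRange 0 ((arr.length : Int) - 1) 1).foldl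
            (cutStepA arr (arr.length : Int) m (arr.count m : Int)) (0, 0)).2 := by
      simp only [count_valid_cuts, hfl]
    have hcast : ((arr.length - 1 : Nat) : Int) = (arr.length : Int) - 1 := by omega
    have hAv := aloop_spec arr m (arr.count m : Int) (arr.length - 1) (by omega)
    rw [hcast] at hAv
    -- B side: the max-by-count pick is m as well
    have hitems := freq_items arr
    have hmem' : (m, (arr.count m : Int))
        ∈ (arr.foldl (fun d x => d.insert x (d.getD x 0 + 1)) (PySem.Dict.empty : PySem.Dict Int Int)).items := by
      rw [hitems]
      exact List.mem_map.mpr ⟨m, (PySem.Set.mem_ofList arr m).mpr hmem, rfl⟩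
    cases hmx : PySem.List.max?
        (arr.foldl (fun d x => d.insert x (d.getD x 0 + 1)) (PySem.Dict.empty : PySem.Dict Int Int)).items
        (fun kv => kv.2) with
    | none =>
      exfalso
      rw [PySem.List.max?_eq_none_iff] at hmx
      rw [hmx] at hmem'
      simp at hmem'
    | some q =>
      have hqmem := PySem.List.max?_mem hmx
      rw [hitems] at hqmem
      obtain ⟨k, hk, hkq⟩ := List.mem_map.mp hqmem
      have hmax := PySem.List.max?_isMax hmx (m, (arr.count m : Int)) hmem'
      have hq2 : q.2 = (arr.count k : Int) := by rw [← hkq]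
      have hkm : k = m := by
        by_contra hne
        have h2c := two_count_le arr k m hne
        rw [hq2] at hmax
        simp only at hmax
        omega
      have hbest : PySem.List.maxD
          (arr.foldl (fun d x => d.insert x (d.getD x 0 + 1)) (PySem.Dict.empty : PySem.Dict Int Int)).items
          (fun kv => kv.2) (0, 0) = (m, (arr.count m : Int)) := by
        simp only [PySem.List.maxD, hmx, Option.getD_some]
        rw [← hkq, hkm]
      have hB : count_valid_cuts_alt arr
          = (PySem.List.pyRange 0 ((arr.length : Int) - 1) 1).foldl
              (cutStepB ((arr.foldl (prefixStep m) (0, [])).2) (arr.length : Int) (arr.count m : Int)) 0 := by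
        simp only [count_valid_cuts_alt, hbest]
        rw [if_neg (by exact not_le.mpr hgt)]
      have hBv := bloop_spec arr m (arr.count m : Int) (arr.length - 1) (by omega)
      rw [hcast] at hBv
      rw [hA, hB, hAv, hBv]
  · push Not at hmaj
    have hfd : 0 ≤ PySem.Int.floordiv (arr.length : Int) 2 := by
      rw [PySem.Int.floordiv_eq_ediv_of_pos (by norm_num)]
      positivity
    have hA : count_valid_cuts arr = 0 := by
      have hfl : find_leader arr = (none, 0) := by
        unfold find_leader
        cases hc : (findLeaderLoop arr none 0).1 with
        | none =>
          simp only [hc]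
          rw [if_neg (not_lt.mpr hfd)]
        | some c =>
          have hle : ¬ (PySem.Int.floordiv (arr.length : Int) 2 < (arr.count c : Int)) := by
            have := hmaj c
            rw [PySem.Int.floordiv_eq_ediv_of_pos (by norm_num)]
            omega
          simp only [hc]
          rw [if_neg hle]
      simp only [count_valid_cuts, hfl]
    have hB : count_valid_cuts_alt arr = 0 := by
      cases hmx : PySem.List.max?
          (arr.foldl (fun d x => d.insert x (d.getD x 0 + 1)) (PySem.Dict.empty : PySem.Dict Int Int)).items
          (fun kv => kv.2) with
      | none =>
        simp only [count_valid_cuts_alt, PySem.List.maxD, hmx, Option.getD_none]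
        rw [if_pos hfd]
      | some q =>
        have hqmem := PySem.List.max?_mem hmx
        rw [freq_items arr] at hqmem
        obtain ⟨k, hk, hkq⟩ := List.mem_map.mp hqmem
        have hq2 : q.2 = (arr.count k : Int) := by rw [← hkq]
        have hle : q.2 ≤ PySem.Int.floordiv (arr.length : Int) 2 := by
          rw [hq2, PySem.Int.floordiv_eq_ediv_of_pos (by norm_num)]
          have := hmaj k
          omega
        simp only [count_valid_cuts_alt, PySem.List.maxD, hmx, Option.getD_some]
        rw [if_pos hle]
    rw [hA, hB]
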